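-- pv_equiv track=rewrite | github.com/9triver/modelforge | src/modelforge/runtime/metrics/classification.py | _per_class_counts
-- ===== SOURCE A (Python) =====
-- from collections import defaultdict
--
-- def _per_class_counts(pairs: list[tuple[str, str]]) -> dict[str, dict[str, int]]:
--     """返回 {label: {tp, fp, fn}}。"""
--     counts: dict[str, dict[str, int]] = defaultdict(lambda: {"tp": 0, "fp": 0, "fn": 0})
--     labels = {a for a, _ in pairs} | {b for _, b in pairs}
--     for label in labels:
--         counts[label]  # 触发 defaultdict 初始化
--     for true, pred in pairs:
--         if true == pred:
--             counts[true]["tp"] += 1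
--         else:
--             counts[pred]["fp"] += 1
--             counts[true]["fn"] += 1
--     return counts
-- ===== SOURCE B (Python) =====
-- from collections import defaultdict
--
-- def _per_class_counts(pairs: list[tuple[str, str]]) -> dict[str, dict[str, int]]:
--     """返回 {label: {tp, fp, fn}}。"""
--     counts: dict[str, dict[str, int]] = defaultdict(lambda: {"tp": 0, "fp": 0, "fn": 0})
--     for label in {t for t, _ in pairs} | {p for _, p in pairs}:
--         counts[label] = {
--             "tp": sum(1 for t, p in pairs if t == p == label),
--             "fp": sum(1 for t, p in pairs if p == label and t != p),
--             "fn": sum(1 for t, p in pairs if t == label and t != p),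
--         }
--     return counts
-- ===== Notes on version B (the rewrite author's own statement) =====
-- stated objective: alternative
-- what changed: A makes one pass over the pairs mutating tp/fp/fn cells of a seeded defaultdict; B never mutates counters: it inverts the loop structure and, for each label of the union, scans the whole pairs list three times, computing that label's tp/fp/fn independently as counts of matching pairs (O(n*k) nested scans instead of A's single tallying pass).
import Mathlib
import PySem

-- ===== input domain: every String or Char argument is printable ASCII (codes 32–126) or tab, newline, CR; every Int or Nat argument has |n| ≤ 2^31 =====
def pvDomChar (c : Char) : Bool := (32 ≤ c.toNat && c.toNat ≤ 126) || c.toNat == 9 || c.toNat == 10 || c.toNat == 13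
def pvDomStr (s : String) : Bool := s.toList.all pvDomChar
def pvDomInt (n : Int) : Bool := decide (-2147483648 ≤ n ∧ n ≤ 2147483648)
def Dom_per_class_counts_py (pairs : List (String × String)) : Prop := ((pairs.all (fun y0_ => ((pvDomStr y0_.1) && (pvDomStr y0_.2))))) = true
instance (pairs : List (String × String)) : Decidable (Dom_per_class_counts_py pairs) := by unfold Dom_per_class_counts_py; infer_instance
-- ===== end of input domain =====

-- B inverts A's loop structure: instead of one pass over the pairs mutating a seeded
-- defaultdict, B computes each union label's tp/fp/fn independently by counting the
-- matching pairs in separate scans of the pairs list (objective: alternative).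

-- ===== PORT A =====
-- the defaultdict factory `lambda: {"tp": 0, "fp": 0, "fn": 0}`
def pvDefInner : PySem.Dict String Int := PySem.Dict.mk [("tp", 0), ("fp", 0), ("fn", 0)]

def per_class_counts_py (pairs : List (String × String)) : List (String × List (String × Int)) :=
  -- labels = {a for a,_ in pairs} | {b for _,b in pairs}
  let labels : PySem.Set String :=
    PySem.Set.union (PySem.Set.ofList (pairs.map (·.1))) (PySem.Set.ofList (pairs.map (·.2)))
  -- for label in labels: counts[label]   (defaultdict seeding)
  let counts0 : PySem.Dict String (PySem.Dict String Int) :=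
    labels.foldl (fun d l => d.setdefault l pvDefInner) PySem.Dict.empty
  -- for true, pred in pairs: …  (counts[k][f] += 1 on the defaultdict = modify with the factory default)
  let counts : PySem.Dict String (PySem.Dict String Int) :=
    pairs.foldl (fun d pr =>
      if pr.1 == pr.2 then
        d.modify pr.1 pvDefInner (fun m => m.modify "tp" 0 (· + 1))
      else
        (d.modify pr.2 pvDefInner (fun m => m.modify "fp" 0 (· + 1))).modify pr.1 pvDefInner
          (fun m => m.modify "fn" 0 (· + 1))) counts0
  counts.items.map (fun kv => (kv.1, kv.2.items))

-- ===== PORT B =====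
def per_class_counts_py_alt (pairs : List (String × String)) : List (String × List (String × Int)) :=
  -- for label in {t for t,_ in pairs} | {p for _,p in pairs}:
  --   counts[label] = {"tp": sum(1 for t,p in pairs if t == p == label), …}
  -- (`sum(1 for … if cond)` is ported as List.countP)
  let counts : PySem.Dict String (PySem.Dict String Int) :=
    (PySem.Set.union (PySem.Set.ofList (pairs.map (·.1)))
        (PySem.Set.ofList (pairs.map (·.2)))).foldl
      (fun d label =>
        d.insert label (PySem.Dict.mk
          [("tp", (pairs.countP (fun pr => pr.1 == pr.2 && pr.2 == label) : Int)),
           ("fp", (pairs.countP (fun pr => pr.2 == label && !(pr.1 == pr.2)) : Int)),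
           ("fn", (pairs.countP (fun pr => pr.1 == label && !(pr.1 == pr.2)) : Int))]))
      PySem.Dict.empty
  counts.items.map (fun kv => (kv.1, kv.2.items))

-- ===== PRECONDITION & SPEC =====
def Spec_per_class_counts_py (pairs : List (String × String)) (out : List (String × List (String × Int))) : Prop := out = per_class_counts_py_alt pairs
instance (pairs : List (String × String)) (out : List (String × List (String × Int))) : Decidable (Spec_per_class_counts_py pairs out) := by unfold Spec_per_class_counts_py; infer_instance

-- ===== CLAIM (what is proved, stated in full; the proofs are below) =====
def Claim_equal_per_class_counts_py : Prop := ∀ (pairs : List (String × String)), Dom_per_class_counts_py pairs → Spec_per_class_counts_py pairs (per_class_counts_py pairs)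

-- ===== LEMMAS AND PROOFS =====

-- the per-label counts, phrased as B computes them
def cntTp (ps : List (String × String)) (l : String) : Int :=
  (ps.countP (fun pr => pr.1 == pr.2 && pr.2 == l) : Nat)
def cntFp (ps : List (String × String)) (l : String) : Int :=
  (ps.countP (fun pr => pr.2 == l && !(pr.1 == pr.2)) : Nat)
def cntFn (ps : List (String × String)) (l : String) : Int :=
  (ps.countP (fun pr => pr.1 == l && !(pr.1 == pr.2)) : Nat)

-- inner-dict updates on the canonical {"tp","fp","fn"} shape
theorem modTp (x y z : Int) :
    (PySem.Dict.mk [("tp", x), ("fp", y), ("fn", z)]).modify "tp" 0 (· + 1)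
      = PySem.Dict.mk [("tp", x + 1), ("fp", y), ("fn", z)] := by
  simp [PySem.Dict.modify, PySem.Dict.insert, PySem.Dict.getD, PySem.Dict.get?,
    PySem.Dict.contains, List.find?]

theorem modFp (x y z : Int) :
    (PySem.Dict.mk [("tp", x), ("fp", y), ("fn", z)]).modify "fp" 0 (· + 1)
      = PySem.Dict.mk [("tp", x), ("fp", y + 1), ("fn", z)] := by
  simp [PySem.Dict.modify, PySem.Dict.insert, PySem.Dict.getD, PySem.Dict.get?,
    PySem.Dict.contains, List.find?]

theorem modFn (x y z : Int) :
    (PySem.Dict.mk [("tp", x), ("fp", y), ("fn", z)]).modify "fn" 0 (· + 1)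
      = PySem.Dict.mk [("tp", x), ("fp", y), ("fn", z + 1)] := by
  simp [PySem.Dict.modify, PySem.Dict.insert, PySem.Dict.getD, PySem.Dict.get?,
    PySem.Dict.contains, List.find?]

-- getD / contains / keys through a single defaultdict-style modify
theorem getD_modify_eq (d : PySem.Dict String (PySem.Dict String Int)) (k l : String)
    (dflt : PySem.Dict String Int) (f : PySem.Dict String Int → PySem.Dict String Int) :
    (d.modify k dflt f).getD l dflt = if l = k then f (d.getD k dflt) else d.getD l dflt := by
  simp only [PySem.Dict.modify, PySem.Dict.getD_insert]

theorem contains_modify_of_contains (d : PySem.Dict String (PySem.Dict String Int)) (k q : String)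
    (dflt : PySem.Dict String Int) (f : PySem.Dict String Int → PySem.Dict String Int)
    (h : d.contains k = true) : (d.modify k dflt f).contains q = d.contains q := by
  simp only [PySem.Dict.modify, PySem.Dict.contains_insert]
  by_cases hq : q = k
  · simp [hq, h]
  · simp [hq]

theorem keys_modify_of_contains (d : PySem.Dict String (PySem.Dict String Int)) (k : String)
    (dflt : PySem.Dict String Int) (f : PySem.Dict String Int → PySem.Dict String Int)
    (h : d.contains k = true) : (d.modify k dflt f).keys = d.keys := by
  simp only [PySem.Dict.modify]
  exact PySem.Dict.keys_insert_of_contains d _ h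

-- a fold of setdefault over fresh, distinct keys is a fold of insert
theorem foldl_setdefault_eq_insert (v : PySem.Dict String Int) :
    ∀ (L : List String) (d : PySem.Dict String (PySem.Dict String Int)),
      (∀ l ∈ L, d.contains l = false) → L.Nodup →
      L.foldl (fun d l => d.setdefault l v) d = L.foldl (fun d l => d.insert l v) d := by
  intro L
  induction L with
  | nil => intro d _ _; rfl
  | cons a L ih =>
    intro d hf hnd
    simp only [List.foldl_cons]
    rw [PySem.Dict.setdefault_of_not_contains d v (hf a (by simp))]
    exact ih _ (fun l hl => by
      rw [PySem.Dict.contains_insert]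
      have hne : l ≠ a := fun h => (List.nodup_cons.mp hnd).1 (h ▸ hl)
      simp [hne, hf l (by simp [hl])]) (List.nodup_cons.mp hnd).2

-- getD through a fold of constant-value inserts
theorem getD_foldl_insert_const (v : PySem.Dict String Int) (x : String) :
    ∀ (L : List String) (d : PySem.Dict String (PySem.Dict String Int)),
      (L.foldl (fun d l => d.insert l v) d).getD x pvDefInner
        = if x ∈ L then v else d.getD x pvDefInner := by
  intro L
  induction L with
  | nil => intro d; simp
  | cons a L ih =>
    intro d
    simp only [List.foldl_cons, ih, PySem.Dict.getD_insert, List.mem_cons]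
    by_cases hx : x ∈ L <;> by_cases ha : x = a <;> simp [hx, ha]

-- the pairs loop leaves every key set unchanged …
theorem keys_pairs_fold :
    ∀ (ps : List (String × String)) (d : PySem.Dict String (PySem.Dict String Int)),
      (∀ pr ∈ ps, d.contains pr.1 = true ∧ d.contains pr.2 = true) →
      (ps.foldl (fun d pr =>
        if pr.1 == pr.2 then
          d.modify pr.1 pvDefInner (fun m => m.modify "tp" 0 (· + 1))
        else
          (d.modify pr.2 pvDefInner (fun m => m.modify "fp" 0 (· + 1))).modify pr.1 pvDefInner
            (fun m => m.modify "fn" 0 (· + 1))) d).keys = d.keys := by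
  intro ps
  induction ps with
  | nil => intro d _; rfl
  | cons pr ps ih =>
    intro d hc
    obtain ⟨h1, h2⟩ := hc pr (by simp)
    simp only [List.foldl_cons]
    by_cases he : (pr.1 == pr.2) = true
    · rw [if_pos he]
      rw [ih _ (fun q hq => by
          obtain ⟨hq1, hq2⟩ := hc q (by simp [hq])
          rw [contains_modify_of_contains _ _ _ _ _ h1, contains_modify_of_contains _ _ _ _ _ h1]
          exact ⟨hq1, hq2⟩),
        keys_modify_of_contains _ _ _ _ h1]
    · rw [if_neg he]
      have h2' : (d.modify pr.2 pvDefInner (fun m => m.modify "fp" 0 (· + 1))).contains pr.1 = true := by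
        rw [contains_modify_of_contains _ _ _ _ _ h2]; exact h1
      rw [ih _ (fun q hq => by
          obtain ⟨hq1, hq2⟩ := hc q (by simp [hq])
          rw [contains_modify_of_contains _ _ _ _ _ h2', contains_modify_of_contains _ _ _ _ _ h2,
            contains_modify_of_contains _ _ _ _ _ h2', contains_modify_of_contains _ _ _ _ _ h2]
          exact ⟨hq1, hq2⟩),
        keys_modify_of_contains _ _ _ _ h2', keys_modify_of_contains _ _ _ _ h2]

-- … and turns each label's triple into the three counts
theorem getD_pairs_fold (l : String) :
    ∀ (ps : List (String × String)) (d : PySem.Dict String (PySem.Dict String Int)) (x y z : Int),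
      d.getD l pvDefInner = PySem.Dict.mk [("tp", x), ("fp", y), ("fn", z)] →
      (ps.foldl (fun d pr =>
        if pr.1 == pr.2 then
          d.modify pr.1 pvDefInner (fun m => m.modify "tp" 0 (· + 1))
        else
          (d.modify pr.2 pvDefInner (fun m => m.modify "fp" 0 (· + 1))).modify pr.1 pvDefInner
            (fun m => m.modify "fn" 0 (· + 1))) d).getD l pvDefInner
        = PySem.Dict.mk [("tp", x + cntTp ps l), ("fp", y + cntFp ps l), ("fn", z + cntFn ps l)] := by
  intro ps
  induction ps with
  | nil => intro d x y z h; simpa [cntTp, cntFp, cntFn] using h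
  | cons pr ps ih =>
    intro d x y z h
    obtain ⟨t, p⟩ := pr
    simp only [List.foldl_cons]
    by_cases he : (t == p) = true
    · rw [if_pos he]
      have htp : t = p := by simpa using he
      by_cases hl : l = t
      · subst hl
        have hd' : (d.modify l pvDefInner (fun m => m.modify "tp" 0 (· + 1))).getD l pvDefInner
            = PySem.Dict.mk [("tp", x + 1), ("fp", y), ("fn", z)] := by
          rw [getD_modify_eq, if_pos rfl, h]; exact modTp x y z
        rw [ih _ _ _ _ hd']
        have e1 : cntTp ((l, p) :: ps) l = cntTp ps l + 1 := by
          simp [cntTp, List.countP_cons, he, htp]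
        have e2 : cntFp ((l, p) :: ps) l = cntFp ps l := by
          simp [cntFp, List.countP_cons, he]
        have e3 : cntFn ((l, p) :: ps) l = cntFn ps l := by
          simp [cntFn, List.countP_cons, he]
        rw [e1, e2, e3]
        have : x + 1 + cntTp ps l = x + (cntTp ps l + 1) := by ring
        rw [this]
      · have hd' : (d.modify t pvDefInner (fun m => m.modify "tp" 0 (· + 1))).getD l pvDefInner
            = PySem.Dict.mk [("tp", x), ("fp", y), ("fn", z)] := by
          rw [getD_modify_eq, if_neg hl, h]
        rw [ih _ _ _ _ hd']
        have e1 : cntTp ((t, p) :: ps) l = cntTp ps l := by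
          have : ¬ p = l := fun hh => hl ((htp.trans hh).symm)
          simp [cntTp, List.countP_cons, this]
        have e2 : cntFp ((t, p) :: ps) l = cntFp ps l := by
          simp [cntFp, List.countP_cons, he]
        have e3 : cntFn ((t, p) :: ps) l = cntFn ps l := by
          simp [cntFn, List.countP_cons, he]
        rw [e1, e2, e3]
    · rw [if_neg he]
      have htp : ¬ t = p := by simpa using he
      by_cases hl : l = t
      · subst hl
        have h1' : (d.modify p pvDefInner (fun m => m.modify "fp" 0 (· + 1))).getD l pvDefInner
            = PySem.Dict.mk [("tp", x), ("fp", y), ("fn", z)] := by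
          rw [getD_modify_eq, if_neg htp, h]
        have hd' : ((d.modify p pvDefInner (fun m => m.modify "fp" 0 (· + 1))).modify l pvDefInner
              (fun m => m.modify "fn" 0 (· + 1))).getD l pvDefInner
            = PySem.Dict.mk [("tp", x), ("fp", y), ("fn", z + 1)] := by
          rw [getD_modify_eq, if_pos rfl, h1']; exact modFn x y z
        rw [ih _ _ _ _ hd']
        have e1 : cntTp ((l, p) :: ps) l = cntTp ps l := by
          simp [cntTp, List.countP_cons, he]
        have e2 : cntFp ((l, p) :: ps) l = cntFp ps l := by
          have : ¬ p = l := fun hh => htp hh.symm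
          simp [cntFp, this]
        have e3 : cntFn ((l, p) :: ps) l = cntFn ps l + 1 := by
          simp [cntFn, List.countP_cons, he]
        rw [e1, e2, e3]
        have : z + 1 + cntFn ps l = z + (cntFn ps l + 1) := by ring
        rw [this]
      · by_cases hp : l = p
        · subst hp
          have hd' : ((d.modify l pvDefInner (fun m => m.modify "fp" 0 (· + 1))).modify t pvDefInner
                (fun m => m.modify "fn" 0 (· + 1))).getD l pvDefInner
              = PySem.Dict.mk [("tp", x), ("fp", y + 1), ("fn", z)] := by
            rw [getD_modify_eq, if_neg hl, getD_modify_eq, if_pos rfl, h]; exact modFp x y z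
          rw [ih _ _ _ _ hd']
          have e1 : cntTp ((t, l) :: ps) l = cntTp ps l := by
            simp [cntTp, List.countP_cons, he]
          have e2 : cntFp ((t, l) :: ps) l = cntFp ps l + 1 := by
            simp [cntFp, List.countP_cons, he]
          have e3 : cntFn ((t, l) :: ps) l = cntFn ps l := by
            have : ¬ t = l := fun hh => hl hh.symm
            simp [cntFn, this]
          rw [e1, e2, e3]
          have : y + 1 + cntFp ps l = y + (cntFp ps l + 1) := by ring
          rw [this]
        · have hd' : ((d.modify p pvDefInner (fun m => m.modify "fp" 0 (· + 1))).modify t pvDefInner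
                (fun m => m.modify "fn" 0 (· + 1))).getD l pvDefInner
              = PySem.Dict.mk [("tp", x), ("fp", y), ("fn", z)] := by
            rw [getD_modify_eq, if_neg hl, getD_modify_eq, if_neg hp, h]
          rw [ih _ _ _ _ hd']
          have e1 : cntTp ((t, p) :: ps) l = cntTp ps l := by
            have : ¬ p = l := fun hh => hp hh.symm
            simp [cntTp, List.countP_cons, this]
          have e2 : cntFp ((t, p) :: ps) l = cntFp ps l := by
            have : ¬ p = l := fun hh => hp hh.symm
            simp [cntFp, this]
          have e3 : cntFn ((t, p) :: ps) l = cntFn ps l := by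
            have : ¬ t = l := fun hh => hl hh.symm
            simp [cntFn, this]
          rw [e1, e2, e3]

-- ===== VERDICT (by name: the statement is the Claim_ definition above) =====
theorem per_class_counts_py_spec : Claim_equal_per_class_counts_py := by
  intro pairs _
  unfold Spec_per_class_counts_py
  simp only [per_class_counts_py, per_class_counts_py_alt]
  set L : PySem.Set String :=
    PySem.Set.union (PySem.Set.ofList (pairs.map (·.1))) (PySem.Set.ofList (pairs.map (·.2))) with hL
  have hnd : L.Nodup := PySem.Set.nodup_union _ _ (PySem.Set.nodup_ofList _)
  have hmemL : ∀ pr ∈ pairs, pr.1 ∈ L ∧ pr.2 ∈ L := by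
    intro pr hpr
    constructor
    · rw [hL, PySem.Set.mem_union]; left
      rw [PySem.Set.mem_ofList]; exact List.mem_map_of_mem hpr
    · rw [hL, PySem.Set.mem_union]; right
      rw [PySem.Set.mem_ofList]; exact List.mem_map_of_mem hpr
  have hfresh : ∀ l ∈ L, (PySem.Dict.empty : PySem.Dict String (PySem.Dict String Int)).contains l = false :=
    fun l _ => PySem.Dict.contains_empty l
  rw [foldl_setdefault_eq_insert pvDefInner L PySem.Dict.empty hfresh hnd]
  set c0 : PySem.Dict String (PySem.Dict String Int) :=
    L.foldl (fun d l => d.insert l pvDefInner) PySem.Dict.empty with hc0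
  have hc0items : c0.items = L.map (fun l => (l, pvDefInner)) := by
    rw [hc0]
    have := PySem.Dict.items_foldl_insert_fresh L (fun l => l) (fun _ => pvDefInner)
      PySem.Dict.empty hfresh (by simpa using hnd)
    simpa [PySem.Dict.empty] using this
  have hc0keys : c0.keys = L := by
    rw [PySem.Dict.keys, hc0items, List.map_map]
    exact List.map_id L
  have hc0getD : ∀ l ∈ L, c0.getD l pvDefInner = pvDefInner := by
    intro l hl
    rw [hc0, getD_foldl_insert_const, if_pos hl]
  have hcont : ∀ pr ∈ pairs, c0.contains pr.1 = true ∧ c0.contains pr.2 = true := by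
    intro pr hpr
    obtain ⟨hm1, hm2⟩ := hmemL pr hpr
    constructor
    · simp only [PySem.Dict.contains, hc0items, List.any_eq_true]
      exact ⟨(pr.1, pvDefInner), List.mem_map_of_mem hm1, by simp⟩
    · simp only [PySem.Dict.contains, hc0items, List.any_eq_true]
      exact ⟨(pr.2, pvDefInner), List.mem_map_of_mem hm2, by simp⟩
  have hkeys := keys_pairs_fold pairs c0 hcont
  rw [hc0keys] at hkeys
  have hndk : (pairs.foldl (fun d pr =>
      if pr.1 == pr.2 then
        d.modify pr.1 pvDefInner (fun m => m.modify "tp" 0 (· + 1))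
      else
        (d.modify pr.2 pvDefInner (fun m => m.modify "fp" 0 (· + 1))).modify pr.1 pvDefInner
          (fun m => m.modify "fn" 0 (· + 1))) c0).keys.Nodup := by rw [hkeys]; exact hnd
  rw [PySem.Dict.items_eq_map_keys _ hndk pvDefInner, hkeys]
  have hBitems := PySem.Dict.items_foldl_insert_fresh L (fun l => l)
    (fun label => PySem.Dict.mk
      [("tp", (pairs.countP (fun pr => pr.1 == pr.2 && pr.2 == label) : Int)),
       ("fp", (pairs.countP (fun pr => pr.2 == label && !(pr.1 == pr.2)) : Int)),
       ("fn", (pairs.countP (fun pr => pr.1 == label && !(pr.1 == pr.2)) : Int))])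
    PySem.Dict.empty hfresh (by simpa using hnd)
  rw [hBitems]
  simp only [List.map_map, PySem.Dict.empty, List.nil_append]
  apply List.map_congr_left
  intro l hl
  have hgd := getD_pairs_fold l pairs c0 0 0 0 (by rw [hc0getD l hl]; rfl)
  simp only [Function.comp, hgd]
  simp [cntTp, cntFp, cntFn]
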